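-- pv_equiv track=rewrite | github.com/MaxSush/Network-Packet-Analysis-Tool | app/Utility/BPF_Syntax.py | list_to_bpf
-- ===== SOURCE A (Python) =====
-- def list_to_bpf(filter_list):
--     if not filter_list:
--         return ""
--
--     bpf_parts = []
--     host = None
--     port = None
--
--     for filter in filter_list:
--         filter = filter.strip().lower()
--
--         if filter in ["tcp", "udp", "icmp", "arp"]:  # Standard protocols
--             bpf_parts.append(filter)
--         elif filter.startswith("host "):  # Host filter (e.g., 'host 192.168.1.10')
--             host = filter
--         elif filter.startswith("port "):  # Port filter (e.g., 'port 80')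
--             port = filter
--         else:
--             bpf_parts.append(filter)  # Add custom filters as-is
--
--     if host and port:
--         bpf_parts.append(f"{host} and {port}")
--     elif host:
--         bpf_parts.append(host)
--     elif port:
--         bpf_parts.append(port)
--
--     if len(bpf_parts) == 1:
--         return bpf_parts[0]
--     else:
--         return " or ".join(bpf_parts)
-- ===== SOURCE B (Python) =====
-- def list_to_bpf(filter_list):
--     norm = [f.strip().lower() for f in filter_list]
--     parts = [f for f in norm if not (f.startswith("host ") or f.startswith("port "))]
--     host = next((f for f in reversed(norm) if f.startswith("host ")), None)
--     port = next((f for f in reversed(norm) if f.startswith("port ")), None)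
--     if host and port:
--         parts.append(f"{host} and {port}")
--     elif host:
--         parts.append(host)
--     elif port:
--         parts.append(port)
--     return " or ".join(parts)
-- ===== Notes on version B (the rewrite author's own statement) =====
-- stated objective: simpler
-- what changed: Replaces the single stateful loop (accumulator list plus host/port variables) and the len==1 special case by a normalize-once map, a comprehension keeping non-host/port items, two reversed-scan last-match extractions, and an unconditional ' or '.join (join of a singleton already equals the element, and the empty-list guard is redundant).
import Mathlib
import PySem

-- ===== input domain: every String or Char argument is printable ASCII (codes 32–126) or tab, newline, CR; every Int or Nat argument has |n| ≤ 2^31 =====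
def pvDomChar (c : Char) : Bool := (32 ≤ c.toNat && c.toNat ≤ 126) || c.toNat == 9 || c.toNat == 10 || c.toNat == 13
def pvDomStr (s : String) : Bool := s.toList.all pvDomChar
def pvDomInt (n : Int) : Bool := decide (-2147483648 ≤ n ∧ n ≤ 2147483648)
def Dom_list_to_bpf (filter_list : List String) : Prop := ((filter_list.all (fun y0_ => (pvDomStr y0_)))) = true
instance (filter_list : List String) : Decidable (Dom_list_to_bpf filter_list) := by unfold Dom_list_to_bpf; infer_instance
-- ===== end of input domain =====

-- B replaces A's stateful loop by a comprehension plus two last-match scans and one unconditional join (simpler decomposition; same cost).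

-- ===== PORT A =====
-- the loop over filter_list with its three pieces of state (bpf_parts, host, port)
def list_to_bpf_loop (fs : List String) (parts : List String) (host port : Option String) :
    List String × Option String × Option String :=
  match fs with
  | [] => (parts, host, port)
  | f :: rest =>
    let f := PySem.Str.lower (PySem.Str.strip f)
    if f ∈ ["tcp", "udp", "icmp", "arp"] then
      list_to_bpf_loop rest (parts ++ [f]) host port
    else if PySem.Str.startswith f "host " then
      list_to_bpf_loop rest parts (some f) port
    else if PySem.Str.startswith f "port " then
      list_to_bpf_loop rest parts host (some f)
    else
      list_to_bpf_loop rest (parts ++ [f]) host port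

def list_to_bpf (filter_list : List String) : String :=
  if filter_list = [] then ""
  else
    let st := list_to_bpf_loop filter_list [] none none
    -- `if host and port: …` — a found host/port string is nonempty, so truthiness = `some`
    let parts :=
      match st.2.1, st.2.2 with
      | some h, some p => st.1 ++ [h ++ " and " ++ p]
      | some h, none   => st.1 ++ [h]
      | none,   some p => st.1 ++ [p]
      | none,   none   => st.1
    if parts.length = 1 then parts.headD "" else PySem.Str.join " or " parts

-- ===== PORT B =====
def list_to_bpf_alt (filter_list : List String) : String :=
  let norm := filter_list.map (fun f => PySem.Str.lower (PySem.Str.strip f))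
  let parts := norm.filter
    (fun f => !(PySem.Str.startswith f "host " || PySem.Str.startswith f "port "))
  let host := norm.reverse.find? (fun f => PySem.Str.startswith f "host ")
  let port := norm.reverse.find? (fun f => PySem.Str.startswith f "port ")
  let parts :=
    match host, port with
    | some h, some p => parts ++ [h ++ " and " ++ p]
    | some h, none   => parts ++ [h]
    | none,   some p => parts ++ [p]
    | none,   none   => parts
  PySem.Str.join " or " parts

-- ===== PRECONDITION & SPEC =====
def Spec_list_to_bpf (filter_list : List String) (out : String) : Prop := out = list_to_bpf_alt filter_list
instance (filter_list : List String) (out : String) : Decidable (Spec_list_to_bpf filter_list out) := by unfold Spec_list_to_bpf; infer_instance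

-- ===== CLAIM (what is proved, stated in full; the proofs are below) =====
def Claim_equal_list_to_bpf : Prop := ∀ (filter_list : List String), Dom_list_to_bpf filter_list → Spec_list_to_bpf filter_list (list_to_bpf filter_list)

-- ===== LEMMAS AND PROOFS =====

theorem host_not_port (s : String) (hh : PySem.Str.startswith s "host " = true) :
    PySem.Str.startswith s "port " = false := by
  rw [PySem.Str.startswith_eq] at hh ⊢
  rw [PySem.Chars.startswith_iff] at hh
  rw [Bool.eq_false_iff, ne_eq, PySem.Chars.startswith_iff]
  intro hp
  rcases List.prefix_or_prefix_of_prefix hh hp with h | h <;> revert h <;> decide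

theorem loop_characterization (fs : List String) (parts : List String) (host port : Option String) :
    list_to_bpf_loop fs parts host port =
      (parts ++ (fs.map (fun f => PySem.Str.lower (PySem.Str.strip f))).filter
          (fun f => !(PySem.Str.startswith f "host " || PySem.Str.startswith f "port ")),
       ((fs.map (fun f => PySem.Str.lower (PySem.Str.strip f))).reverse.find?
          (fun f => PySem.Str.startswith f "host ")).or host,
       ((fs.map (fun f => PySem.Str.lower (PySem.Str.strip f))).reverse.find?
          (fun f => PySem.Str.startswith f "port ")).or port) := by
  induction fs generalizing parts host port with
  | nil => simp only [list_to_bpf_loop, List.map_nil, List.filter_nil, List.append_nil,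
      List.reverse_nil, List.find?_nil, Option.none_or]
  | cons f rest ih =>
    simp only [list_to_bpf_loop, List.map_cons, List.filter_cons, List.reverse_cons,
      List.find?_append, List.find?_singleton]
    by_cases hm : PySem.Str.lower (PySem.Str.strip f) ∈ ["tcp", "udp", "icmp", "arp"]
    · have hm' := hm
      simp only [List.mem_cons, List.not_mem_nil, or_false] at hm'
      have h1 : PySem.Str.startswith (PySem.Str.lower (PySem.Str.strip f)) "host " = false := by
        rcases hm' with h | h | h | h <;> rw [h] <;> decide
      have h2 : PySem.Str.startswith (PySem.Str.lower (PySem.Str.strip f)) "port " = false := by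
        rcases hm' with h | h | h | h <;> rw [h] <;> decide
      rw [if_pos hm, ih]
      simp at h1 h2
      simp [h1, h2]
    · rw [if_neg hm]
      by_cases hh : PySem.Str.startswith (PySem.Str.lower (PySem.Str.strip f)) "host " = true
      · have h2 : PySem.Str.startswith (PySem.Str.lower (PySem.Str.strip f)) "port " = false :=
          host_not_port _ hh
        rw [if_pos hh, ih]
        simp at hh h2
        simp [hh, h2]
      · rw [if_neg hh]
        simp only [Bool.not_eq_true] at hh
        by_cases hp : PySem.Str.startswith (PySem.Str.lower (PySem.Str.strip f)) "port " = true
        · rw [if_pos hp, ih]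
          simp at hh hp
          simp [hh, hp]
        · rw [if_neg hp, ih]
          simp only [Bool.not_eq_true] at hp
          simp at hh hp
          simp [hh, hp]

theorem join_or_cases (l : List String) :
    (if l.length = 1 then l.headD "" else PySem.Str.join " or " l) = PySem.Str.join " or " l := by
  by_cases h : l.length = 1
  · obtain ⟨x, rfl⟩ := List.length_eq_one_iff.mp h
    rw [if_pos h]
    simp [PySem.Str.join, PySem.Chars.join, List.intercalate]
  · rw [if_neg h]

-- ===== VERDICT (by name: the statement is the Claim_ definition above) =====
theorem list_to_bpf_spec : Claim_equal_list_to_bpf := by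
  intro filter_list _
  unfold Spec_list_to_bpf list_to_bpf list_to_bpf_alt
  by_cases hnil : filter_list = []
  · subst hnil
    simp only [List.map_nil, List.filter_nil, List.reverse_nil, List.find?_nil]
    simp [PySem.Str.join, PySem.Chars.join, List.intercalate]
  · simp only [if_neg hnil, loop_characterization, Option.or_none, List.nil_append]
    exact join_or_cases _
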